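-- pv_equiv track=rewrite | github.com/CSID-DGU/ASCP | ReinforcementLearning/CrewPairingEnv.py | shift_minus_ones
-- ===== SOURCE A (Python) =====
-- def shift_minus_ones(lst):
--     shifted_list = []
--     for sublist in lst:
--         new_sublist = [num for num in sublist if num != -1]  # -1을 제외한 숫자들
--         new_sublist.extend(
--             [-1] * (len(sublist) - len(new_sublist)))  # 남는 자리에 -1 추가
--         shifted_list.append(new_sublist)
--     return shifted_list
-- ===== SOURCE B (Python) =====
-- def shift_minus_ones(lst):
--     return [sorted(sublist, key=lambda x: x == -1) for sublist in lst]
-- ===== Notes on version B (the rewrite author's own statement) =====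
-- stated objective: idiomatic
-- what changed: Replaces the per-sublist filter-then-pad partition with a single stable sort keyed on the boolean x == -1, which keeps non-(-1) values in order at the front and pushes all -1s to the end.
import Mathlib
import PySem

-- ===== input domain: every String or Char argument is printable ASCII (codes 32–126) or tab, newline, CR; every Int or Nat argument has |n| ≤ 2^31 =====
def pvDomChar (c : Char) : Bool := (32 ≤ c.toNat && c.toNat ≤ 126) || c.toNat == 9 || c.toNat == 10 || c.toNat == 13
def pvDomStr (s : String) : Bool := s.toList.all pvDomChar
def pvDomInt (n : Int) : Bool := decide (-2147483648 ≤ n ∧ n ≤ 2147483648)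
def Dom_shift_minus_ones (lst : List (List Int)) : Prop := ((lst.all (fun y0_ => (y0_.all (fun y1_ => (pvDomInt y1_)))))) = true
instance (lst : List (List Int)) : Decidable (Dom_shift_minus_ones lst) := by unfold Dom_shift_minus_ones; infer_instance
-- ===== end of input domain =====

-- B replaces A's per-sublist filter-then-pad with one stable sort keyed on the boolean (x == -1); idiomatic, not faster.

-- ===== PORT A =====
def shift_minus_ones (lst : List (List Int)) : List (List Int) :=
  lst.foldl (fun shifted_list sublist =>
    let new_sublist := sublist.filter (fun num => num ≠ -1)
    let new_sublist := new_sublist ++ List.replicate (sublist.length - new_sublist.length) (-1)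
    shifted_list ++ [new_sublist]) []

-- ===== PORT B =====
def shift_minus_ones_alt (lst : List (List Int)) : List (List Int) :=
  lst.map (fun sublist => PySem.List.sorted sublist (fun x => x == -1) false)

-- ===== PRECONDITION & SPEC =====
def Spec_shift_minus_ones (lst : List (List Int)) (out : List (List Int)) : Prop := out = shift_minus_ones_alt lst
instance (lst : List (List Int)) (out : List (List Int)) : Decidable (Spec_shift_minus_ones lst out) := by unfold Spec_shift_minus_ones; infer_instance

-- ===== CLAIM (what is proved, stated in full; the proofs are below) =====
def Claim_equal_shift_minus_ones : Prop := ∀ (lst : List (List Int)), Dom_shift_minus_ones lst → Spec_shift_minus_ones lst (shift_minus_ones lst)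

-- ===== LEMMAS AND PROOFS =====

-- equation lemmas for PySem's insertion step
theorem insertBy_nil {α : Type} (b : α → α → Bool) (x : α) : PySem.List.insertBy b x [] = [x] := rfl
theorem insertBy_cons {α : Type} (b : α → α → Bool) (x y : α) (ys : List α) :
    PySem.List.insertBy b x (y :: ys) = if b x y then x :: y :: ys else y :: PySem.List.insertBy b x ys := rfl

-- the comparison PySem's stable insertion sort uses for the key (x == -1)
def pvBefore : Int → Int → Bool := fun a b => decide (((a == -1) : Bool) < ((b == -1) : Bool))

theorem pvBefore_neg1_left (y : Int) : pvBefore (-1) y = false := by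
  simp [pvBefore, Bool.lt_iff]

theorem insert_neg1 (acc : List Int) :
    PySem.List.insertBy pvBefore (-1) acc = acc ++ [-1] :=
  PySem.List.insertBy_of_forall_not_before _ _ _ (fun y _ => pvBefore_neg1_left y)

theorem insert_nonneg1 (x : Int) (hx : x ≠ -1) (A R : List Int)
    (hA : ∀ a ∈ A, a ≠ -1) (hR : ∀ r ∈ R, r = -1) :
    PySem.List.insertBy pvBefore x (A ++ R) = (A ++ [x]) ++ R := by
  induction A with
  | nil =>
    cases R with
    | nil => simp [insertBy_nil]
    | cons r rs =>
      have hr : r = -1 := hR r (by simp)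
      have hbt : pvBefore x r = true := by
        simp [pvBefore, hr, Bool.lt_iff, hx]
      simp [insertBy_cons, hbt]
  | cons a A ih =>
    have ha : a ≠ -1 := hA a (by simp)
    have hb : pvBefore x a = false := by
      simp [pvBefore, Bool.lt_iff, ha]
    have ih' := ih (fun a' ha' => hA a' (List.mem_cons_of_mem _ ha'))
    simp [insertBy_cons, hb, ih']

-- invariant of the insertion-sort fold: falses (≠ -1) stay in front, -1s accumulate behind
theorem fold_invariant (s : List Int) : ∀ (A R : List Int),
    (∀ a ∈ A, a ≠ -1) → (∀ r ∈ R, r = -1) →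
    s.foldl (fun acc x => PySem.List.insertBy pvBefore x acc) (A ++ R)
      = (A ++ s.filter (fun n => n ≠ -1)) ++ (R ++ s.filter (fun n => n = -1)) := by
  induction s with
  | nil => intro A R _ _; simp
  | cons x t ih =>
    intro A R hA hR
    by_cases hx : x = -1
    · subst hx
      have := insert_neg1 (A ++ R)
      simp only [List.foldl_cons, this, List.append_assoc]
      rw [ih A (R ++ [-1]) hA (by intro r hr; rcases List.mem_append.1 hr with h | h
                                  · exact hR r h
                                  · simpa using h)]
      simp
    · simp only [List.foldl_cons, insert_nonneg1 x hx A R hA hR]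
      rw [ih (A ++ [x]) R (by intro a ha; rcases List.mem_append.1 ha with h | h
                              · exact hA a h
                              · simp at h; simpa [h] using hx) hR]
      simp [hx]

theorem sorted_partition (s : List Int) :
    PySem.List.sorted s (fun x => x == -1) false
      = s.filter (fun n => n ≠ -1) ++ s.filter (fun n => n = -1) := by
  rw [PySem.List.sorted_eq_foldl_insertBy]
  have := fold_invariant s [] [] (by simp) (by simp)
  simpa [pvBefore] using this

theorem filter_eq_replicate (s : List Int) :
    s.filter (fun n => n = -1)
      = List.replicate (s.filter (fun n => n = -1)).length (-1) := by
  rw [List.eq_replicate_iff]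
  exact ⟨rfl, by intro b hb; simpa using (List.of_mem_filter hb)⟩

theorem filter_length_sub (s : List Int) :
    s.length - (s.filter (fun n => n ≠ -1)).length
      = (s.filter (fun n => n = -1)).length := by
  induction s with
  | nil => simp
  | cons x t ih =>
    have h1 : (t.filter (fun n => !decide (n = -1))).length ≤ t.length := List.length_filter_le _ _
    simp only [decide_not] at ih
    by_cases hx : x = -1
    · simp [hx]
      omega
    · simp [hx]
      omega

theorem sublist_eq (s : List Int) :
    (s.filter (fun num => num ≠ -1))
      ++ List.replicate (s.length - (s.filter (fun num => num ≠ -1)).length) (-1)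
      = PySem.List.sorted s (fun x => x == -1) false := by
  rw [sorted_partition, filter_length_sub, ← filter_eq_replicate]

theorem outer_fold (lst : List (List Int)) : ∀ acc : List (List Int),
    lst.foldl (fun shifted_list sublist =>
      let new_sublist := sublist.filter (fun num => num ≠ -1)
      let new_sublist := new_sublist ++ List.replicate (sublist.length - new_sublist.length) (-1)
      shifted_list ++ [new_sublist]) acc
    = acc ++ lst.map (fun sublist => PySem.List.sorted sublist (fun x => x == -1) false) := by
  induction lst with
  | nil => intro acc; simp
  | cons s t ih =>
    intro acc
    simp only [List.foldl_cons, List.map_cons, ih]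
    rw [sublist_eq s]
    simp

-- ===== VERDICT (by name: the statement is the Claim_ definition above) =====
theorem shift_minus_ones_spec : Claim_equal_shift_minus_ones := by
  intro lst _
  show _ = _
  unfold shift_minus_ones shift_minus_ones_alt
  simpa using outer_fold lst []
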